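-- pv_equiv track=rewrite | github.com/davidrimshnick/GameBench | davechess/engine/gumbel_mcts.py | _get_sequence_of_considered_visits
-- ===== SOURCE A (Python) =====
-- import math
--
-- def _get_sequence_of_considered_visits(max_k: int, num_simulations: int) -> list[int]:
--     """Compute the Sequential Halving visit schedule.
--
--     Returns a list of length num_simulations. Each entry is the target visit
--     count for the "considered" set at that simulation step. Actions whose visit
--     count equals the considered_visit are eligible for selection.
--
--     Algorithm from Appendix A of the Gumbel MuZero paper.
--     """
--     if max_k <= 1:
--         return list(range(num_simulations))
--
--     log2k = max(1, int(math.ceil(math.log2(max_k))))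
--     sequence: list[int] = []
--     # visits[i] = how many visits action at rank i has received
--     visits = [0] * max_k
--     num_considered = max_k
--
--     while len(sequence) < num_simulations:
--         num_extra = max(1, num_simulations // (log2k * num_considered))
--         for _ in range(num_extra):
--             for i in range(num_considered):
--                 sequence.append(visits[i])
--                 if len(sequence) >= num_simulations:
--                     break
--             if len(sequence) >= num_simulations:
--                 break
--         for i in range(num_considered):
--             visits[i] += 1
--         num_considered = max(2, num_considered // 2)
--
--     return sequence[:num_simulations]
-- ===== SOURCE B (Python) =====
-- import math
--
-- def _get_sequence_of_considered_visits(max_k: int, num_simulations: int) -> list[int]: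
--     """Sequential Halving schedule via round boundaries.
--
--     Stage 1 computes only the cumulative end position of each halving round;
--     stage 2 derives every entry independently: the value at position p is the
--     number of round boundaries at or before p.
--     """
--     if max_k <= 1:
--         return list(range(num_simulations))
--
--     log2k = max(1, int(math.ceil(math.log2(max_k))))
--     ends: list[int] = []
--     total = 0
--     num_considered = max_k
--     while total < num_simulations:
--         total += max(1, num_simulations // (log2k * num_considered)) * num_considered
--         ends.append(total)
--         num_considered = max(2, num_considered // 2)
--
--     return [sum(1 for e in ends if e <= p) for p in range(num_simulations)]
-- ===== Notes on version B (the rewrite author's own statement) =====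
-- stated objective: alternative
-- what changed: B never materialises the per-round blocks A appends: a first pass records only each halving round's cumulative end position, and a second pass derives every schedule entry independently as the number of round boundaries at or before its index.
import Mathlib
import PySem

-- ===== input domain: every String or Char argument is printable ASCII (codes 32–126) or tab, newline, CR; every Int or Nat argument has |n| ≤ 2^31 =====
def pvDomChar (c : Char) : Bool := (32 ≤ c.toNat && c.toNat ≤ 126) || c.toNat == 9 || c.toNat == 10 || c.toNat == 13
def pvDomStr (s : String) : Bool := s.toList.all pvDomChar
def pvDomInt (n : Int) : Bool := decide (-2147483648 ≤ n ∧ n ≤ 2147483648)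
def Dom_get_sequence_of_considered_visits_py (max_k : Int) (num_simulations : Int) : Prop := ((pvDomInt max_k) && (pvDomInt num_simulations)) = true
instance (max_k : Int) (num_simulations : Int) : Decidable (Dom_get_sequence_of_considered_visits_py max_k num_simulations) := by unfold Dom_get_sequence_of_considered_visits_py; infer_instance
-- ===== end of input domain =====

-- B never materialises the per-round blocks A appends: it first computes only the cumulative end
-- position of each halving round, then derives every entry independently as the number of round
-- boundaries at or before its index (alternative decomposition, same cost).

-- ===== PORT A =====
-- inner `for i in range(num_considered)` loop with its break once the schedule is full;
-- `visits[i]` is always in range here (0 ≤ i < num_considered ≤ len(visits)), so getD is exact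
def pvInnerA (visits : List Int) (ns : Int) : List Int → List Int → List Int
  | seq, [] => seq
  | seq, i :: rest =>
      let seq' := seq ++ [visits.getD i.toNat 0]
      if ns ≤ (seq'.length : Int) then seq' else pvInnerA visits ns seq' rest

-- outer `for _ in range(num_extra)` loop with its break
def pvOuterA (visits : List Int) (ns nc : Int) : List Int → Nat → List Int
  | seq, 0 => seq
  | seq, k+1 =>
      let seq' := pvInnerA visits ns seq (PySem.List.pyRange 0 nc 1)
      if ns ≤ (seq'.length : Int) then seq' else pvOuterA visits ns nc seq' k

-- the `while len(sequence) < num_simulations` loop; each iteration appends at least one element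
-- (num_extra ≥ 1, num_considered ≥ 2), so fuel = num_simulations bounds the iteration count
def pvLoopA (ns log2k : Int) : List Int → Int → List Int → Nat → List Int
  | _, _, seq, 0 => seq
  | visits, nc, seq, fuel+1 =>
      if (seq.length : Int) < ns then
        let num_extra := max 1 (PySem.Int.floordiv ns (log2k * nc))
        let seq' := pvOuterA visits ns nc seq num_extra.toNat
        -- for i in range(num_considered): visits[i] += 1
        let visits' := visits.mapIdx (fun i v => if (i : Int) < nc then v + 1 else v)
        pvLoopA ns log2k visits' (max 2 (PySem.Int.floordiv nc 2)) seq' fuel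
      else seq

def get_sequence_of_considered_visits_py (max_k : Int) (num_simulations : Int) : List Int :=
  if max_k ≤ 1 then PySem.List.pyRange 0 num_simulations 1
  else
    -- max(1, int(math.ceil(math.log2(max_k)))) = max 1 (Nat.clog 2 max_k): exact for 2 ≤ max_k ≤ 2^31
    let log2k : Int := max 1 (Nat.clog 2 max_k.toNat : Int)
    let seq := pvLoopA num_simulations log2k (List.replicate max_k.toNat 0) max_k [] num_simulations.toNat
    PySem.List.slice seq none (some num_simulations)

-- ===== PORT B =====
-- B's stage 1: the `while total < num_simulations` loop accumulating cumulative round ends;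
-- every round adds ≥ 2 to total, so fuel = num_simulations bounds the iteration count
def pvEndsB (ns log2k : Int) : Int → Int → List Int → Nat → List Int
  | _, _, ends, 0 => ends
  | total, nc, ends, fuel+1 =>
      if total < ns then
        let total' := total + max 1 (PySem.Int.floordiv ns (log2k * nc)) * nc
        pvEndsB ns log2k total' (max 2 (PySem.Int.floordiv nc 2)) (ends ++ [total']) fuel
      else ends

-- `sum(1 for e in ends if e <= p)`
def pvCountLE (ends : List Int) (p : Int) : Int :=
  ends.foldl (fun acc e => if e ≤ p then acc + 1 else acc) 0

def get_sequence_of_considered_visits_py_alt (max_k : Int) (num_simulations : Int) : List Int :=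
  if max_k ≤ 1 then PySem.List.pyRange 0 num_simulations 1
  else
    let log2k : Int := max 1 (Nat.clog 2 max_k.toNat : Int)
    let ends := pvEndsB num_simulations log2k 0 max_k [] num_simulations.toNat
    (PySem.List.pyRange 0 num_simulations 1).map (fun p => pvCountLE ends p)

-- ===== PRECONDITION & SPEC =====
def Spec_get_sequence_of_considered_visits_py (max_k : Int) (num_simulations : Int) (out : List Int) : Prop := out = get_sequence_of_considered_visits_py_alt max_k num_simulations
instance (max_k : Int) (num_simulations : Int) (out : List Int) : Decidable (Spec_get_sequence_of_considered_visits_py max_k num_simulations out) := by unfold Spec_get_sequence_of_considered_visits_py; infer_instance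

-- ===== CLAIM (what is proved, stated in full; the proofs are below) =====
def Claim_equal_get_sequence_of_considered_visits_py : Prop := ∀ (max_k : Int) (num_simulations : Int), Dom_get_sequence_of_considered_visits_py max_k num_simulations → Spec_get_sequence_of_considered_visits_py max_k num_simulations (get_sequence_of_considered_visits_py max_k num_simulations)

-- ===== LEMMAS AND PROOFS =====

-- proof-only bridge: A's while-loop with the visits array replaced by the round counter
def pvLoopB (ns log2k : Int) : Int → Int → List Int → Nat → List Int
  | _, _, seq, 0 => seq
  | count, nc, seq, fuel+1 =>
      if (seq.length : Int) < ns then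
        let num_extra := max 1 (PySem.Int.floordiv ns (log2k * nc))
        let seq' := seq ++ List.replicate (num_extra * nc).toNat count
        pvLoopB ns log2k (count+1) (max 2 (PySem.Int.floordiv nc 2)) seq' fuel
      else seq

-- A's inner break-loop appends `count` once per index, truncated at ns, when all visited
-- entries it reads equal `count`.
theorem pvInnerA_eq (visits : List Int) (ns count : Int) :
    ∀ (is seq : List Int),
      (∀ i ∈ is, 0 ≤ i ∧ visits.getD i.toNat 0 = count) →
      (seq.length : Int) < ns →
      pvInnerA visits ns seq is
        = seq ++ List.replicate (min is.length (ns.toNat - seq.length)) count := by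
  intro is
  induction is with
  | nil => intro seq _ hlt; simp [pvInnerA]
  | cons i rest ih =>
      intro seq hinv hlt
      have hv : visits.getD i.toNat 0 = count := (hinv i (by simp)).2
      have hns : 0 < ns := lt_of_le_of_lt (by positivity) hlt
      simp only [pvInnerA, hv]
      by_cases hb : ns ≤ ((seq ++ [count]).length : Int)
      · simp only [hb, if_pos]
        have : min (rest.length + 1) (ns.toNat - seq.length) = 1 := by
          simp at hb; omega
        simp [this]
      · simp only [hb, if_neg, not_false_iff]
        have hlt' : (((seq ++ [count]).length : Int)) < ns := by
          simp at hb ⊢; omega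
        rw [ih (seq ++ [count]) (fun j hj => hinv j (by simp [hj])) hlt']
        have hmin : min (rest.length + 1) (ns.toNat - seq.length)
            = min rest.length (ns.toNat - (seq.length + 1)) + 1 := by
          simp at hb; omega
        simp only [List.length_append, List.length_cons, List.length_nil]
        rw [List.append_assoc]
        congr 1
        rw [hmin, List.replicate_succ]
        simp

-- A's outer break-loop appends k · nc copies of `count`, truncated at ns.
theorem pvOuterA_eq (visits : List Int) (ns nc count : Int) (h1 : 1 ≤ nc)
    (hinv : ∀ i : Int, 0 ≤ i → i < nc → visits.getD i.toNat 0 = count) :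
    ∀ (k : Nat) (seq : List Int), (seq.length : Int) < ns →
      pvOuterA visits ns nc seq k
        = seq ++ List.replicate (min (k * nc.toNat) (ns.toNat - seq.length)) count := by
  intro k
  induction k with
  | zero => intro seq hlt; simp [pvOuterA]
  | succ k ih =>
      intro seq hlt
      have hns : 0 < ns := lt_of_le_of_lt (by positivity) hlt
      have hinner : pvInnerA visits ns seq (PySem.List.pyRange 0 nc 1)
          = seq ++ List.replicate (min nc.toNat (ns.toNat - seq.length)) count := by
        have := pvInnerA_eq visits ns count (PySem.List.pyRange 0 nc 1) seq
          (fun i hi => by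
            rw [PySem.List.mem_pyRange_one] at hi
            exact ⟨hi.1, hinv i hi.1 hi.2⟩) hlt
        rwa [PySem.List.length_pyRange_one, Int.sub_zero] at this
      simp only [pvOuterA, hinner]
      by_cases hb : ns ≤ (((seq ++ List.replicate (min nc.toNat (ns.toNat - seq.length)) count).length : Int))
      · simp only [hb, if_pos]
        have hT : min nc.toNat (ns.toNat - seq.length) = ns.toNat - seq.length := by
          simp at hb; omega
        have : min ((k+1) * nc.toNat) (ns.toNat - seq.length) = ns.toNat - seq.length := by
          have h1' : 1 ≤ nc.toNat := by omega
          have : nc.toNat ≤ (k+1) * nc.toNat := Nat.le_mul_of_pos_left _ (by omega)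
          omega
        rw [hT, this]
      · simp only [hb, if_neg, not_false_iff]
        have hlen : min nc.toNat (ns.toNat - seq.length) = nc.toNat ∧
            seq.length + nc.toNat < ns.toNat := by
          simp at hb; omega
        rw [hlen.1]
        have hlt' : (((seq ++ List.replicate nc.toNat count).length : Int)) < ns := by
          simp; omega
        rw [ih _ hlt']
        rw [List.append_assoc]
        congr 1
        simp only [List.length_append, List.length_replicate]
        have hsplit : min ((k+1) * nc.toNat) (ns.toNat - seq.length)
            = nc.toNat + min (k * nc.toNat) (ns.toNat - (seq.length + nc.toNat)) := by
          have hmul : (k+1) * nc.toNat = k * nc.toNat + nc.toNat := by ring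
          omega
        rw [hsplit, Nat.add_comm nc.toNat, List.replicate_add]
        simp [Nat.add_comm]

-- pvLoopA returns its sequence unchanged once it is full.
theorem pvLoopA_full (ns log2k : Int) (visits : List Int) (nc : Int) (seq : List Int)
    (fuel : Nat) (h : ¬ (seq.length : Int) < ns) :
    pvLoopA ns log2k visits nc seq fuel = seq := by
  cases fuel with
  | zero => rfl
  | succ f => simp [pvLoopA, h]

theorem pvLoopB_full (ns log2k count nc : Int) (seq : List Int)
    (fuel : Nat) (h : ¬ (seq.length : Int) < ns) :
    pvLoopB ns log2k count nc seq fuel = seq := by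
  cases fuel with
  | zero => rfl
  | succ f => simp [pvLoopB, h]

-- Invariant: while every considered visits-entry equals `count`, A's loop and the
-- counter loop agree up to the final truncation at ns.
theorem pvLoop_eq (ns log2k : Int) :
    ∀ (fuel : Nat) (visits : List Int) (nc count : Int) (seq : List Int),
      2 ≤ nc → nc ≤ (visits.length : Int) →
      (∀ i : Int, 0 ≤ i → i < nc → visits.getD i.toNat 0 = count) →
      (pvLoopA ns log2k visits nc seq fuel).take ns.toNat
        = (pvLoopB ns log2k count nc seq fuel).take ns.toNat := by
  intro fuel
  induction fuel with
  | zero => intro _ _ _ _ _ _ _; rfl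
  | succ f ih =>
      intro visits nc count seq h2 hlen hinv
      by_cases hrun : (seq.length : Int) < ns
      · have hns : 0 < ns := lt_of_le_of_lt (by positivity) hrun
        simp only [pvLoopA, pvLoopB, hrun, if_pos]
        set num_extra := max 1 (PySem.Int.floordiv ns (log2k * nc)) with hne
        have hex : 1 ≤ num_extra := le_max_left _ _
        have htn : (num_extra * nc).toNat = num_extra.toNat * nc.toNat := by
          rcases Int.eq_ofNat_of_zero_le (le_trans (by omega) hex) with ⟨e, he⟩
          rcases Int.eq_ofNat_of_zero_le (le_trans (by omega) h2) with ⟨c, hc⟩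
          rw [he, hc, ← Nat.cast_mul, Int.toNat_natCast]; simp
        have houter := pvOuterA_eq visits ns nc count (by omega) hinv num_extra.toNat seq hrun
        have hlen' : (visits.mapIdx (fun i v => if (i : Int) < nc then v + 1 else v)).length
            = visits.length := by simp
        have hfd : PySem.Int.floordiv nc 2 = nc / 2 :=
          PySem.Int.floordiv_eq_ediv_of_pos (by omega)
        have hnc' : max 2 (PySem.Int.floordiv nc 2) ≤ nc := by
          rw [hfd]; exact max_le (by omega) (by omega)
        have hinv' : ∀ i : Int, 0 ≤ i → i < max 2 (PySem.Int.floordiv nc 2) →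
            (visits.mapIdx (fun i v => if (i : Int) < nc then v + 1 else v)).getD i.toNat 0
              = count + 1 := by
          intro i hi0 hi
          have hi_nc : i < nc := lt_of_lt_of_le hi hnc'
          have hidx : i.toNat < visits.length := by omega
          rw [List.getD_eq_getElem _ _ (by simpa using hidx), List.getElem_mapIdx]
          have : ((i.toNat : Int)) < nc := by omega
          rw [if_pos this]
          have := hinv i hi0 hi_nc
          rw [List.getD_eq_getElem _ _ hidx] at this
          omega
        by_cases hE : num_extra.toNat * nc.toNat ≤ ns.toNat - seq.length
        · have : pvOuterA visits ns nc seq num_extra.toNat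
              = seq ++ List.replicate ((num_extra * nc).toNat) count := by
            rw [houter, htn, Nat.min_eq_left hE]
          rw [this]
          exact ih _ _ _ _ (le_max_left _ _) (by rw [hlen']; omega) hinv'
        · push_neg at hE
          have hmin : min (num_extra.toNat * nc.toNat) (ns.toNat - seq.length)
              = ns.toNat - seq.length := by omega
          have hfullA := pvLoopA_full ns log2k
            (visits.mapIdx (fun i v => if (i : Int) < nc then v + 1 else v))
            (max 2 (PySem.Int.floordiv nc 2))
            (seq ++ List.replicate (ns.toNat - seq.length) count) f
            (by simp only [List.length_append, List.length_replicate]; omega)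
          have hfullB := pvLoopB_full ns log2k (count + 1)
            (max 2 (PySem.Int.floordiv nc 2))
            (seq ++ List.replicate ((num_extra * nc).toNat) count) f
            (by simp only [List.length_append, List.length_replicate, htn]; omega)
          rw [houter, hmin, hfullA, hfullB]
          have hsl : seq.length ≤ ns.toNat := by omega
          rw [List.take_append, List.take_append]
          have h1 : seq.take ns.toNat = seq := List.take_of_length_le hsl
          rw [h1, List.take_replicate, List.take_replicate, htn]
          congr 2
          omega
      · simp only [pvLoopA, pvLoopB, hrun, if_neg, not_false_iff]

-- Bridge to B: the counter loop's entry at any position p < ns equals the number of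
-- round boundaries (B's stage 1) at or before p; and the loop fills at least ns entries.
theorem pvBridge (ns log2k : Int) :
    ∀ (fuel : Nat) (nc : Int) (seq acc : List Int),
      2 ≤ nc →
      (∀ e ∈ acc, e ≤ (seq.length : Int)) →
      (∀ p : Nat, p < seq.length →
          seq.getD p 0 = (acc.countP (fun e => decide (e ≤ (p:Int))) : Int)) →
      ns ≤ (seq.length : Int) + fuel →
      ns ≤ ((pvLoopB ns log2k (acc.length : Int) nc seq fuel).length : Int) ∧
      ∀ p : Nat, (p : Int) < ns →
        (pvLoopB ns log2k (acc.length : Int) nc seq fuel).getD p 0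
          = ((pvEndsB ns log2k (seq.length : Int) nc acc fuel).countP
              (fun e => decide (e ≤ (p:Int))) : Int) := by
  intro fuel
  induction fuel with
  | zero =>
      intro nc seq acc _ _ hidx hfuel
      simp only [pvLoopB, pvEndsB]
      refine ⟨by simpa using hfuel, ?_⟩
      intro p hp
      exact hidx p (by omega)
  | succ f ih =>
      intro nc seq acc h2 hacc hidx hfuel
      by_cases hrun : (seq.length : Int) < ns
      · simp only [pvLoopB, pvEndsB, hrun, if_pos]
        set E := max 1 (PySem.Int.floordiv ns (log2k * nc)) with hE
        have hE1 : 1 ≤ E := le_max_left _ _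
        have hblock : 2 ≤ E * nc := by nlinarith
        have hcast : ((E * nc).toNat : Int) = E * nc := Int.toNat_of_nonneg (by omega)
        set seq' := seq ++ List.replicate (E * nc).toNat (acc.length : Int) with hseq'
        set acc' := acc ++ [(seq.length : Int) + E * nc] with hacc'
        have hlen' : (seq'.length : Int) = (seq.length : Int) + E * nc := by
          simp [hseq', hcast]
        have hcount' : ((acc.length : Int) + 1) = (acc'.length : Int) := by
          simp [hacc']
        have hmem' : ∀ e ∈ acc', e ≤ (seq'.length : Int) := by
          intro e he
          rw [hlen']
          rcases List.mem_append.mp he with h | h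
          · have := hacc e h; omega
          · simp at h; omega
        have hidx' : ∀ p : Nat, p < seq'.length →
            seq'.getD p 0 = (acc'.countP (fun e => decide (e ≤ (p:Int))) : Int) := by
          intro p hp
          have hcp : acc'.countP (fun e => decide (e ≤ (p:Int)))
              = acc.countP (fun e => decide (e ≤ (p:Int)))
                + if ((seq.length : Int) + E * nc ≤ (p:Int)) then 1 else 0 := by
            rw [hacc', List.countP_append]
            simp [List.countP_cons]
          by_cases hlo : p < seq.length
          · rw [hseq', List.getD_append _ _ _ _ hlo, hidx p hlo, hcp]
            have : ¬ ((seq.length : Int) + E * nc ≤ (p:Int)) := by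
              push_neg; have : (p : Int) < (seq.length : Int) := by exact_mod_cast hlo
              omega
            simp [this]
          · push_neg at hlo
            have hhi : p - seq.length < (E * nc).toNat := by
              have := hp; simp [hseq'] at this; omega
            have hget : seq'.getD p 0 = (acc.length : Int) := by
              rw [hseq']
              rw [List.getD_eq_getElem _ _ (by simpa [hseq'] using hp)]
              rw [List.getElem_append_right (by omega)]
              simp
            rw [hget, hcp]
            have hall : acc.countP (fun e => decide (e ≤ (p:Int))) = acc.length :=
              List.countP_eq_length.mpr (fun e he => by
                have h1 := hacc e he
                have h2 : (seq.length : Int) ≤ (p : Int) := by exact_mod_cast hlo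
                simp; omega)
            have hnew : ¬ ((seq.length : Int) + E * nc ≤ (p:Int)) := by
              have : (p : Int) < (seq'.length : Int) := by exact_mod_cast hp
              rw [hlen'] at this; omega
            simp [hall, hnew]
        have hfuel' : ns ≤ (seq'.length : Int) + f := by
          rw [hlen']; omega
        have := ih (max 2 (PySem.Int.floordiv nc 2)) seq' acc'
          (le_max_left _ _) hmem' hidx' hfuel'
        rw [← hcount', hlen'] at this
        exact this
      · simp only [pvLoopB, pvEndsB, hrun, if_neg, not_false_iff]
        push_neg at hrun
        refine ⟨hrun, ?_⟩
        intro p hp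
        exact hidx p (by omega)

-- ===== VERDICT (by name: the statement is the Claim_ definition above) =====
theorem get_sequence_of_considered_visits_py_spec : Claim_equal_get_sequence_of_considered_visits_py := by
  unfold Claim_equal_get_sequence_of_considered_visits_py
  intro max_k ns _
  unfold Spec_get_sequence_of_considered_visits_py
  unfold get_sequence_of_considered_visits_py get_sequence_of_considered_visits_py_alt
  by_cases hk : max_k ≤ 1
  · simp [hk]
  · simp only [hk, if_neg, not_false_iff]
    push_neg at hk
    by_cases hns : ns ≤ 0
    · have h0 : ns.toNat = 0 := by omega
      rw [h0]
      show PySem.List.slice [] none (some ns) = (PySem.List.pyRange 0 ns 1).map _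
      have : PySem.List.pyRange 0 ns 1 = [] := by
        rw [PySem.List.pyRange_one]
        have : (ns - 0).toNat = 0 := by omega
        rw [this]; rfl
      rw [this]
      simp [PySem.List.slice]
    · push_neg at hns
      set log2k : Int := max 1 (Nat.clog 2 max_k.toNat : Int) with hl
      set L := pvLoopB ns log2k 0 max_k [] ns.toNat with hL
      set ends := pvEndsB ns log2k 0 max_k [] ns.toNat with hends
      have hA : PySem.List.slice
            (pvLoopA ns log2k (List.replicate max_k.toNat 0) max_k [] ns.toNat) none (some ns)
          = L.take ns.toNat := by
        rw [PySem.List.slice_to _ hns.le]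
        apply pvLoop_eq
        · omega
        · rw [List.length_replicate]; omega
        · intro i hi0 hi
          have hlt : i.toNat < max_k.toNat := by omega
          rw [List.getD_eq_getElem _ 0 (by rw [List.length_replicate]; exact hlt)]
          simp
      have hbridge := pvBridge ns log2k ns.toNat max_k [] []
        (by omega) (by simp) (by simp) (by simpa using Int.self_le_toNat ns)
      simp only [List.length_nil, Nat.cast_zero] at hbridge
      rw [← hL, ← hends] at hbridge
      obtain ⟨hlenL, hval⟩ := hbridge
      rw [hA]
      apply List.ext_getElem
      · rw [List.length_take, List.length_map, PySem.List.length_pyRange_one]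
        omega
      · intro i h1 h2
        have hiN : i < ns.toNat := by
          rw [List.length_take] at h1; omega
        have hiL : i < L.length := by omega
        have h? : ((PySem.List.pyRange 0 ns 1).map (fun p => pvCountLE ends p))[i]?
            = some (pvCountLE ends (i : Nat)) := by
          have hns2 : ns = ((ns.toNat : Nat) : Int) := by omega
          rw [hns2]
          exact PySem.List.getElem?_map_pyRange_zero _ ns.toNat i hiN
        rw [List.getElem?_eq_getElem h2] at h?
        have hsome := Option.some.inj h?
        rw [hsome, List.getElem_take, ← List.getD_eq_getElem L 0 hiL, hval i (by omega)]
        have hcle := PySem.List.foldl_count_if (fun e => decide (e ≤ ((i : Nat) : Int))) ends 0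
        simp only [decide_eq_true_eq] at hcle
        rw [pvCountLE, hcle]
        simp
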